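-- pv_equiv track=rewrite | github.com/supachawal/JavaProgramming | GCJ2008PP/A_AlienNumbers.py | extractAlienNumber
-- ===== SOURCE A (Python) =====
-- def extractAlienNumber(digits, numberString):
--     ret = 0
--     radix = len(digits)
--     digitMap = {digits[x]: x for x in range(radix)}
--     posVal = 1
--     for i in range(len(numberString) - 1, -1, -1):
--         ret += digitMap[numberString[i]] * posVal
--         posVal *= radix
--
--     return ret
-- ===== SOURCE B (Python) =====
-- def extractAlienNumber(digits, numberString):
--     radix = len(digits)
--     digitMap = {digits[x]: x for x in range(radix)}
--     ret = 0
--     for c in numberString: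
--         ret = ret * radix + digitMap[c]
--     return ret
-- ===== Notes on version B (the rewrite author's own statement) =====
-- stated objective: idiomatic
-- what changed: Replaces the reversed-index loop that tracks an explicit positional weight (posVal) with a left-to-right Horner accumulation ret = ret*radix + digit, dropping the power tracking and the reversed range entirely.
import Mathlib
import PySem

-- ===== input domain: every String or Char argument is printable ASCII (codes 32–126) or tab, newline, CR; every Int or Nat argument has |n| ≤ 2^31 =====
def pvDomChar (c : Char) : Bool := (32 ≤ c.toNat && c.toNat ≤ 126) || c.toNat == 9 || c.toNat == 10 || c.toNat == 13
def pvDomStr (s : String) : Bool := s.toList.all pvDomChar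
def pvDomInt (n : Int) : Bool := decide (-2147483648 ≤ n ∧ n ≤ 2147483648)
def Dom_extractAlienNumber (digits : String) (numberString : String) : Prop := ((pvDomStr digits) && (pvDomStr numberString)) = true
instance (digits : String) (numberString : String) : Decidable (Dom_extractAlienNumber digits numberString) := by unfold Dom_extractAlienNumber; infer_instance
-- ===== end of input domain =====

-- B replaces A's reversed-index loop with explicit positional weight by a left-to-right Horner accumulation (idiomatic; same O(n) cost).

-- ===== PORT A =====
-- digitMap = {digits[x]: x for x in range(radix)}  (shared by both ports: B builds the identical dict)
def alienDigitMap (digits : String) : PySem.Dict Char Int :=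
  (PySem.List.pyRange 0 (PySem.Str.len digits) 1).foldl
    (fun d x => d.insert (PySem.List.pyGetD digits.toList x ' ') x) PySem.Dict.empty

def extractAlienNumber (digits : String) (numberString : String) : Int :=
  let radix : Int := PySem.Str.len digits
  let digitMap := alienDigitMap digits
  -- for i in range(len(numberString)-1, -1, -1): ret += digitMap[numberString[i]] * posVal; posVal *= radix
  -- (digitMap[c] via getD 0: Pre_ guarantees the key is present, so the default is never read)
  ((PySem.List.pyRange (PySem.Str.len numberString - 1) (-1) (-1)).foldl
    (fun (st : Int × Int) i =>
      (st.1 + digitMap.getD (PySem.List.pyGetD numberString.toList i ' ') 0 * st.2, st.2 * radix))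
    (0, 1)).1

-- ===== PORT B =====
def extractAlienNumber_alt (digits : String) (numberString : String) : Int :=
  let radix : Int := PySem.Str.len digits
  let digitMap := alienDigitMap digits
  -- for c in numberString: ret = ret * radix + digitMap[c]
  numberString.toList.foldl (fun ret c => ret * radix + digitMap.getD c 0) 0

-- ===== PRECONDITION & SPEC =====
-- Pre_ excludes exactly the inputs where Python's digitMap[...] raises KeyError (a character of
-- numberString not occurring in digits): both A and B raise there.
def Pre_extractAlienNumber (digits : String) (numberString : String) : Prop :=
  numberString.toList.all (fun c => digits.toList.contains c) = true
instance (digits : String) (numberString : String) : Decidable (Pre_extractAlienNumber digits numberString) := by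
  unfold Pre_extractAlienNumber; infer_instance

def pvWitness_extractAlienNumber : String × String := ("abc", "cab")

def Spec_extractAlienNumber (digits : String) (numberString : String) (out : Int) : Prop := out = extractAlienNumber_alt digits numberString
instance (digits : String) (numberString : String) (out : Int) : Decidable (Spec_extractAlienNumber digits numberString out) := by unfold Spec_extractAlienNumber; infer_instance

-- ===== CLAIM (what is proved, stated in full; the proofs are below) =====
def Claim_equal_extractAlienNumber : Prop := ∀ (digits : String) (numberString : String), Dom_extractAlienNumber digits numberString → Pre_extractAlienNumber digits numberString → Spec_extractAlienNumber digits numberString (extractAlienNumber digits numberString)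

-- ===== LEMMAS AND PROOFS =====

-- A's pair loop over any character list: first component = ret + pos * (little-endian value)
theorem pairFold_eq (f : Char → Int) (r : Int) :
    ∀ (ds : List Char) (ret pos : Int),
      (ds.foldl (fun (st : Int × Int) c => (st.1 + f c * st.2, st.2 * r)) (ret, pos)).1
        = ret + pos * ds.foldr (fun c a => f c + r * a) 0 := by
  intro ds
  induction ds with
  | nil => intro ret pos; simp
  | cons c t ih =>
      intro ret pos
      simp only [List.foldl_cons, List.foldr_cons, ih]
      ring

theorem extractAlienNumber_spec_aux (digits numberString : String) :
    extractAlienNumber digits numberString = extractAlienNumber_alt digits numberString := by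
  simp only [extractAlienNumber, extractAlienNumber_alt]
  have hrange : PySem.List.pyRange (PySem.Str.len numberString - 1) (-1) (-1)
      = (PySem.List.pyRange 0 (PySem.Str.len numberString) 1).reverse := by
    have := PySem.List.pyRange_neg_one_eq_reverse (PySem.Str.len numberString - 1) (-1)
    simpa using this
  have hmap : (PySem.List.pyRange 0 (PySem.Str.len numberString) 1).map
      (fun i => PySem.List.pyGetD numberString.toList i ' ') = numberString.toList := by
    simpa [PySem.Str.len_eq] using
      PySem.List.map_pyGetD_pyRange_zero (xs := numberString.toList) (d := ' ')
  rw [hrange]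
  have hfold :
      ((PySem.List.pyRange 0 (PySem.Str.len numberString) 1).reverse.foldl
        (fun (st : Int × Int) i =>
          (st.1 + (alienDigitMap digits).getD (PySem.List.pyGetD numberString.toList i ' ') 0 * st.2,
           st.2 * PySem.Str.len digits)) (0, 1))
      = (numberString.toList.reverse.foldl
        (fun (st : Int × Int) c => (st.1 + (alienDigitMap digits).getD c 0 * st.2,
           st.2 * PySem.Str.len digits)) (0, 1)) := by
    have h2 : ((PySem.List.pyRange 0 (PySem.Str.len numberString) 1).reverse).map
        (fun i => PySem.List.pyGetD numberString.toList i ' ') = numberString.toList.reverse := by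
      rw [List.map_reverse, hmap]
    rw [← h2, List.foldl_map]
  rw [hfold, pairFold_eq (fun c => (alienDigitMap digits).getD c 0) (PySem.Str.len digits),
      List.foldr_reverse]
  simp only [zero_add, one_mul]
  have hcomm : (fun (a : Int) (c : Char) => (alienDigitMap digits).getD c 0 + PySem.Str.len digits * a)
       = (fun (ret : Int) (c : Char) => ret * PySem.Str.len digits + (alienDigitMap digits).getD c 0) := by
    funext a c; ring
  rw [hcomm]

-- ===== VERDICT (by name: the statement is the Claim_ definition above) =====
theorem extractAlienNumber_spec : Claim_equal_extractAlienNumber := by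
  intro digits numberString _ _
  exact extractAlienNumber_spec_aux digits numberString
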